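-- pv_equiv track=rewrite | github.com/chazzofalf/binary_mosaic_images | image_process.py | __is_one_or_none_of
-- ===== SOURCE A (Python) =====
-- from typing import Iterable
--
-- def __is_one_or_none_of(items:Iterable[bool]):
--     found_true=False
--     for f in items:
--         if f:
--             if not found_true:
--                 found_true=True
--             else:
--                 return False
--     return True
-- ===== SOURCE B (Python) =====
-- def __is_one_or_none_of(items):
--     return sum(1 for f in items if f) <= 1
-- ===== Notes on version B (the rewrite author's own statement) =====
-- stated objective: simpler
-- what changed: Replaces the stateful flag-with-early-return scan by a single aggregate: count the truthy elements in one pass and compare the count to 1.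
import Mathlib
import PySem

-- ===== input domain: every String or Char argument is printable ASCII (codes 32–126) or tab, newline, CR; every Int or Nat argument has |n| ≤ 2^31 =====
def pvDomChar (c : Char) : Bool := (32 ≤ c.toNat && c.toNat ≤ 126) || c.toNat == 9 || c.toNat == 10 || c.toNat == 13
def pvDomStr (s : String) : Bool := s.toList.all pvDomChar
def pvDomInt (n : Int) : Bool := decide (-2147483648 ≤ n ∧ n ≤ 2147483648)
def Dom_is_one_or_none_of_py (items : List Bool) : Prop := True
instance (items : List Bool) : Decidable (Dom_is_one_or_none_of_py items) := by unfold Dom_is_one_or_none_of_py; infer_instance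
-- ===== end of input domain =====

-- B replaces A's boolean-flag/early-return scan by count-trues-then-compare (objective: simpler).


-- ===== PORT A =====
-- A: flag + early return; ported as structural recursion over the list with the flag as state
def isOneOrNoneLoop (found_true : Bool) : List Bool → Bool
  | [] => true
  | f :: rest =>
    if f then
      if !found_true then isOneOrNoneLoop true rest
      else false
    else isOneOrNoneLoop found_true rest

def is_one_or_none_of_py (items : List Bool) : Bool := isOneOrNoneLoop false items

-- ===== PORT B =====
-- B: count the truthy elements, compare with 1
def is_one_or_none_of_py_alt (items : List Bool) : Bool :=
  (items.countP (fun f => f)) ≤ 1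

-- ===== PRECONDITION & SPEC =====
def Spec_is_one_or_none_of_py (items : List Bool) (out : Bool) : Prop := out = is_one_or_none_of_py_alt items
instance (items : List Bool) (out : Bool) : Decidable (Spec_is_one_or_none_of_py items out) := by unfold Spec_is_one_or_none_of_py; infer_instance

-- ===== CLAIM (what is proved, stated in full; the proofs are below) =====
def Claim_equal_is_one_or_none_of_py : Prop := ∀ (items : List Bool), Dom_is_one_or_none_of_py items → Spec_is_one_or_none_of_py items (is_one_or_none_of_py items)

-- ===== LEMMAS AND PROOFS =====

-- ===== VERDICT (by name: the statement is the Claim_ definition above) =====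
theorem loop_eq_count (items : List Bool) (b : Bool) :
    isOneOrNoneLoop b items = decide (items.countP (fun f => f) + (if b then 1 else 0) ≤ 1) := by
  induction items generalizing b with
  | nil => cases b <;> simp [isOneOrNoneLoop]
  | cons f rest ih =>
    cases f <;> cases b <;>
      simp [isOneOrNoneLoop, ih]

theorem is_one_or_none_of_py_spec : Claim_equal_is_one_or_none_of_py := by
  intro items _
  unfold Spec_is_one_or_none_of_py is_one_or_none_of_py is_one_or_none_of_py_alt
  simp [loop_eq_count]
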